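-- pv_equiv track=rewrite | github.com/nitpicker55555/geo_partial | app_changed_agent.py | find_insert_comment_position
-- ===== SOURCE A (Python) =====
-- def find_insert_comment_position(multiline_str, code_line, mode=False):
--     lines = multiline_str
--     comment_positions = []
--     if mode:
--         normal_special_char = '#><;'
--     else:
--         normal_special_char = '#'
--
--     for i, line in enumerate(lines):
--         if line.strip().startswith("#"):
--             comment_positions.append((i, line.strip()))
--
--     for idx, (pos, comment) in enumerate(comment_positions):
--         if idx + 1 < len(comment_positions):
--             next_comment_pos = comment_positions[idx + 1][0]
--             if pos < lines.index(code_line) < next_comment_pos: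
--                 return comment.replace(normal_special_char, '').replace("'", '').strip()
--         else:
--             if pos < lines.index(code_line):
--                 return comment.replace(normal_special_char, '').replace("'", '').strip()
--
--     result = (-1, "")
--     return result[1][4:].strip()
-- ===== SOURCE B (Python) =====
-- def find_insert_comment_position(multiline_str, code_line, mode=False):
--     special = '#><;' if mode else '#'
--     comments = [(i, line.strip()) for i, line in enumerate(multiline_str)
--                 if line.strip().startswith('#')]
--     if not comments:
--         return ''
--     if code_line.strip().startswith('#'):
--         return ''
--     code_idx = multiline_str.index(code_line)
--     best = None
--     for pos, comment in comments:
--         if pos < code_idx: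
--             best = comment
--     if best is None:
--         return ''
--     return best.replace(special, '').replace("'", '').strip()
-- ===== Notes on version B (the rewrite author's own statement) =====
-- stated objective: simpler
-- what changed: B replaces A's idx+1/next_comment_pos lookahead with early return (and repeated list.index calls inside the loop) by one max-selection pass that keeps the last comment whose index is below the single precomputed code index, returning '' up front when there are no comments or the code line is itself a comment.
import Mathlib
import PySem

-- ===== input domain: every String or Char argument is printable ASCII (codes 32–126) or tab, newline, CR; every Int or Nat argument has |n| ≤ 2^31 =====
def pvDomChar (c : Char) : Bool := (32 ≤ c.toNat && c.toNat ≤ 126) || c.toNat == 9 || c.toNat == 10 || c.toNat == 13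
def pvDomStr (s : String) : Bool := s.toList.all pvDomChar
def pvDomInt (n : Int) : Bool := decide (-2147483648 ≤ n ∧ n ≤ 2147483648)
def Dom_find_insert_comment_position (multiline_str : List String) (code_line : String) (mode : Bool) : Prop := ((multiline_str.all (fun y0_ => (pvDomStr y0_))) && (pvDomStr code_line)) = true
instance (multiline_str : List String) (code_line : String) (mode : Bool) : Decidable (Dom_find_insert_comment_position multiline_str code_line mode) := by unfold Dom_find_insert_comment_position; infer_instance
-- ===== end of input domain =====

-- B replaces A's next-comment lookahead / early-return loop (with list.index re-evaluated inside it)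
-- by a single max-selection pass over the comment list; objective: simpler, no speed claim.
-- Header note: neither version mutates its arguments.


-- ===== PORT A =====
-- A's second loop: walks comment_positions, peeking at the NEXT comment's position (idx+1 lookahead);
-- Python evaluates lines.index(code_line) inside the loop, ported by the same index? call in each branch.
-- index? = none is Python's ValueError (excluded by Pre_); the port returns "" there.
def pvLoopA (lines : List String) (code_line : String) (nsc : String) : List (Int × String) → String
  | [] => ""  -- loop fell through: result[1][4:].strip() = ""
  | [(pos, comment)] =>
    match PySem.List.index? lines code_line with
    | some c =>
      if pos < (c : Int) then
        PySem.Str.strip (PySem.Str.replace (PySem.Str.replace comment nsc "") "'" "")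
      else ""
    | none => ""
  | (pos, comment) :: (next_pos, ns) :: t =>
    match PySem.List.index? lines code_line with
    | some c =>
      if pos < (c : Int) ∧ (c : Int) < next_pos then
        PySem.Str.strip (PySem.Str.replace (PySem.Str.replace comment nsc "") "'" "")
      else pvLoopA lines code_line nsc ((next_pos, ns) :: t)
    | none => pvLoopA lines code_line nsc ((next_pos, ns) :: t)

def find_insert_comment_position (multiline_str : List String) (code_line : String) (mode : Bool) : String :=
  let normal_special_char := if mode then "#><;" else "#"
  let comment_positions :=
    (PySem.List.enumerate multiline_str).filterMap
      (fun p => if PySem.Str.startswith (PySem.Str.strip p.2) "#" then some (p.1, PySem.Str.strip p.2) else none)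
  pvLoopA multiline_str code_line normal_special_char comment_positions

-- ===== PORT B =====
def find_insert_comment_position_alt (multiline_str : List String) (code_line : String) (mode : Bool) : String :=
  let special := if mode then "#><;" else "#"
  let comments :=
    (PySem.List.enumerate multiline_str).filterMap
      (fun p => if PySem.Str.startswith (PySem.Str.strip p.2) "#" then some (p.1, PySem.Str.strip p.2) else none)
  if comments = [] then ""
  else if PySem.Str.startswith (PySem.Str.strip code_line) "#" then ""
  else
    match PySem.List.index? multiline_str code_line with
    | none => ""  -- Source B raises ValueError here; excluded by Pre_
    | some code_idx =>
      match comments.foldl (fun best pc => if pc.1 < (code_idx : Int) then some pc.2 else best) none with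
      | none => ""
      | some best => PySem.Str.strip (PySem.Str.replace (PySem.Str.replace best special "") "'" "")

-- ===== PRECONDITION & SPEC =====
-- A raises ValueError exactly when a comment line exists and code_line is absent; Pre_ excludes exactly that.
def Pre_find_insert_comment_position (multiline_str : List String) (code_line : String) (mode : Bool) : Prop :=
  (∀ line ∈ multiline_str, ¬ PySem.Str.startswith (PySem.Str.strip line) "#" = true) ∨ code_line ∈ multiline_str
instance (multiline_str : List String) (code_line : String) (mode : Bool) : Decidable (Pre_find_insert_comment_position multiline_str code_line mode) := by unfold Pre_find_insert_comment_position; infer_instance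
def pvWitness_find_insert_comment_position : List String × String × Bool := (["# note", "x = 1"], "x = 1", false)

def Spec_find_insert_comment_position (multiline_str : List String) (code_line : String) (mode : Bool) (out : String) : Prop := out = find_insert_comment_position_alt multiline_str code_line mode
instance (multiline_str : List String) (code_line : String) (mode : Bool) (out : String) : Decidable (Spec_find_insert_comment_position multiline_str code_line mode out) := by unfold Spec_find_insert_comment_position; infer_instance

-- ===== CLAIM (what is proved, stated in full; the proofs are below) =====
def Claim_equal_find_insert_comment_position : Prop := ∀ (multiline_str : List String) (code_line : String) (mode : Bool), Dom_find_insert_comment_position multiline_str code_line mode → Pre_find_insert_comment_position multiline_str code_line mode → Spec_find_insert_comment_position multiline_str code_line mode (find_insert_comment_position multiline_str code_line mode)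
-- ===== LEMMAS AND PROOFS =====
-- B's fold with any accumulator equals the fold from none, or-ed with the accumulator.
theorem pv_fold_shift (ci : Nat) (l : List (Int × String)) (a : Option String) :
    l.foldl (fun best pc => if pc.1 < (ci : Int) then some pc.2 else best) a =
    (l.foldl (fun best pc => if pc.1 < (ci : Int) then some pc.2 else best) none).or a := by
  induction l generalizing a with
  | nil => simp
  | cons x l ih =>
    simp only [List.foldl_cons]
    rw [ih, ih (if x.1 < (ci : Int) then some x.2 else none)]
    cases h : l.foldl (fun best pc => if pc.1 < (ci : Int) then some pc.2 else best) none with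
    | some y => simp
    | none => simp; split_ifs <;> simp

theorem pv_fold_none_of (ci : Nat) (l : List (Int × String))
    (h : ∀ pc ∈ l, ¬ pc.1 < (ci : Int)) :
    l.foldl (fun best pc => if pc.1 < (ci : Int) then some pc.2 else best) none = none := by
  induction l with
  | nil => rfl
  | cons x l ih =>
    simp only [List.foldl_cons]
    rw [if_neg (h x (List.mem_cons_self))]
    exact ih (fun pc hpc => h pc (List.mem_cons_of_mem _ hpc))

theorem pv_loopA_small (lines : List String) (code_line : String) (nsc : String)
    (c : Nat) (hidx : PySem.List.index? lines code_line = some c)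
    (cps : List (Int × String)) (hc : ∀ pc ∈ cps, ¬ pc.1 < (c : Int)) :
    pvLoopA lines code_line nsc cps = "" := by
  induction cps with
  | nil => rfl
  | cons x rest ih =>
    obtain ⟨p, s⟩ := x
    cases rest with
    | nil =>
      simp only [pvLoopA, hidx]
      rw [if_neg (hc (p, s) (List.mem_cons_self))]
    | cons y t =>
      obtain ⟨np, ns⟩ := y
      simp only [pvLoopA, hidx]
      rw [if_neg (fun hand => hc (p, s) (List.mem_cons_self) hand.1)]
      exact ih (fun pc hpc => hc pc (List.mem_cons_of_mem _ hpc))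

-- if code_idx itself is a comment position, A's loop returns "".
theorem pv_loopA_mem (lines : List String) (code_line : String) (nsc : String)
    (c : Nat) (hidx : PySem.List.index? lines code_line = some c)
    (cps : List (Int × String)) (hpw : cps.Pairwise (fun p q => p.1 < q.1))
    (hc : (c : Int) ∈ cps.map Prod.fst) :
    pvLoopA lines code_line nsc cps = "" := by
  induction cps with
  | nil => simp at hc
  | cons x rest ih =>
    obtain ⟨p, s⟩ := x
    rw [List.pairwise_cons] at hpw
    rw [List.map_cons] at hc
    rcases List.mem_cons.mp hc with hcp | hcr
    · -- c = p
      cases rest with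
      | nil =>
        simp only [pvLoopA, hidx]
        rw [if_neg (by simp at hcp; omega)]
      | cons y t =>
        obtain ⟨np, ns⟩ := y
        simp only [pvLoopA, hidx]
        rw [if_neg (by simp at hcp; rintro ⟨h1, -⟩; omega)]
        exact pv_loopA_small lines code_line nsc c hidx _
          (fun pc hpc => by have := hpw.1 pc hpc; simp at hcp; omega)
    · -- c among the later comment positions
      cases rest with
      | nil => simp at hcr
      | cons y t =>
        obtain ⟨np, ns⟩ := y
        simp only [pvLoopA, hidx]
        have hge : ∀ q ∈ ((np, ns) :: t).map Prod.fst, np ≤ q := by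
          intro q hq
          rw [List.map_cons] at hq
          rcases List.mem_cons.mp hq with h | h
          · omega
          · rw [List.mem_map] at h
            obtain ⟨pc, hpc, rfl⟩ := h
            have := (List.pairwise_cons.mp hpw.2).1 pc hpc
            omega
        rw [if_neg (by rintro ⟨-, h2⟩; have := hge _ hcr; omega)]
        exact ih hpw.2 hcr

-- otherwise A's loop returns exactly B's max-selection result.
theorem pv_loopA_notmem (lines : List String) (code_line : String) (nsc : String)
    (c : Nat) (hidx : PySem.List.index? lines code_line = some c)
    (cps : List (Int × String)) (hpw : cps.Pairwise (fun p q => p.1 < q.1))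
    (hc : (c : Int) ∉ cps.map Prod.fst) :
    pvLoopA lines code_line nsc cps =
      (match cps.foldl (fun best pc => if pc.1 < (c : Int) then some pc.2 else best) none with
       | none => ""
       | some best => PySem.Str.strip (PySem.Str.replace (PySem.Str.replace best nsc "") "'" "")) := by
  induction cps with
  | nil => rfl
  | cons x rest ih =>
    obtain ⟨p, s⟩ := x
    rw [List.pairwise_cons] at hpw
    rw [List.map_cons] at hc
    have hcp : (c : Int) ≠ p := fun h => hc (by rw [h]; exact List.mem_cons_self)
    have hc2 : (c : Int) ∉ rest.map Prod.fst := fun h => hc (List.mem_cons_of_mem _ h)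
    cases rest with
    | nil =>
      simp only [pvLoopA, hidx, List.foldl_cons, List.foldl_nil]
      split_ifs with h <;> simp
    | cons y t =>
      obtain ⟨np, ns⟩ := y
      have hihres := ih hpw.2 hc2
      simp only [pvLoopA, hidx]
      rw [show ((p, s) :: (np, ns) :: t).foldl (fun best pc => if pc.1 < (c : Int) then some pc.2 else best) none
          = (((np, ns) :: t).foldl (fun best pc => if pc.1 < (c : Int) then some pc.2 else best) none).or
              (if p < (c : Int) then some s else none) from by
            rw [List.foldl_cons]; exact pv_fold_shift c _ _]
      by_cases hcond : p < (c : Int) ∧ (c : Int) < np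
      · rw [if_pos hcond]
        rw [pv_fold_none_of c _ (by
          intro pc hpc
          rcases List.mem_cons.mp hpc with h | h
          · rw [h]; simp only; omega
          · have := (List.pairwise_cons.mp hpw.2).1 pc h
            omega)]
        rw [if_pos hcond.1]
        simp
      · rw [if_neg hcond, hihres]
        cases hfold : ((np, ns) :: t).foldl (fun best pc => if pc.1 < (c : Int) then some pc.2 else best) none with
        | some y => simp
        | none =>
          have hp : ¬ p < (c : Int) := by
            intro hp
            have hne : np ≠ (c : Int) := by
              intro h
              exact hc2 (by rw [List.map_cons, ← h]; exact List.mem_cons_self)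
            have hnp : np < (c : Int) := by
              have : ¬ (c : Int) < np := fun h => hcond ⟨hp, h⟩
              omega
            simp only [List.foldl_cons] at hfold
            rw [pv_fold_shift c t, if_pos hnp] at hfold
            cases h2 : t.foldl (fun best pc => if pc.1 < (c : Int) then some pc.2 else best) none <;>
              rw [h2] at hfold <;> simp at hfold
          rw [if_neg hp]
          simp

-- comment positions are strictly increasing
theorem pv_pairwise (lines : List String) :
    ((PySem.List.enumerate lines).filterMap
      (fun p => if PySem.Str.startswith (PySem.Str.strip p.2) "#" then some (p.1, PySem.Str.strip p.2) else none)).Pairwise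
      (fun p q => p.1 < q.1) := by
  apply List.Pairwise.filterMap _ ?_ (PySem.List.pairwise_lt_enumerate lines 0)
  intro a a' hR b hb b' hb'
  split at hb
  · injection hb with hb
    split at hb'
    · injection hb' with hb'
      subst hb; subst hb'
      simpa using hR
    · simp at hb'
  · simp at hb

theorem pv_mem_cps (lines : List String) (pc : Int × String)
    (h : pc ∈ (PySem.List.enumerate lines).filterMap
      (fun p => if PySem.Str.startswith (PySem.Str.strip p.2) "#" then some (p.1, PySem.Str.strip p.2) else none)) :
    ∃ (k : Nat) (_ : k < lines.length), pc = ((k : Int), PySem.Str.strip lines[k]) ∧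
      PySem.Str.startswith (PySem.Str.strip lines[k]) "#" = true := by
  rw [List.mem_filterMap] at h
  obtain ⟨a, ha, hfa⟩ := h
  rw [PySem.List.mem_enumerate_iff] at ha
  obtain ⟨k, hk, rfl⟩ := ha
  have hfa' : (if PySem.Str.startswith (PySem.Str.strip lines[k]) "#" = true
      then some ((0 : Int) + (k : Int), PySem.Str.strip lines[k]) else none) = some pc := hfa
  by_cases hs : PySem.Str.startswith (PySem.Str.strip lines[k]) "#" = true
  · rw [if_pos hs] at hfa'
    injection hfa' with h
    refine ⟨k, hk, ?_, hs⟩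
    rw [← h]
    simp
  · rw [if_neg hs] at hfa'
    simp at hfa'

-- ===== VERDICT =====
theorem find_insert_comment_position_spec : Claim_equal_find_insert_comment_position := by
  intro ms cl mode _ hpre
  unfold Spec_find_insert_comment_position
  simp only [find_insert_comment_position, find_insert_comment_position_alt]
  set nsc := (if mode then "#><;" else "#") with hnsc
  set cps := (PySem.List.enumerate ms).filterMap
      (fun p => if PySem.Str.startswith (PySem.Str.strip p.2) "#" then some (p.1, PySem.Str.strip p.2) else none)
    with hcps
  by_cases h0 : cps = []
  · rw [if_pos h0, h0]
    rfl
  · rw [if_neg h0]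
    have hmemcl : cl ∈ ms := by
      rcases hpre with h | h
      · exfalso
        apply h0
        rw [hcps, List.filterMap_eq_nil_iff]
        intro a ha
        rw [PySem.List.mem_enumerate_iff] at ha
        obtain ⟨k, hk, rfl⟩ := ha
        exact if_neg (h _ (ms.getElem_mem hk))
      · exact h
    obtain ⟨c, hidx⟩ := Option.isSome_iff_exists.mp ((PySem.List.index?_isSome_iff ms cl).mpr hmemcl)
    obtain ⟨hclen, hcleq, -⟩ := PySem.List.getElem_of_index?_eq_some hidx
    have hpw : cps.Pairwise (fun p q => p.1 < q.1) := hcps ▸ pv_pairwise ms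
    by_cases hcom : PySem.Str.startswith (PySem.Str.strip cl) "#" = true
    · rw [if_pos hcom]
      apply pv_loopA_mem ms cl nsc c hidx cps hpw
      rw [List.mem_map]
      refine ⟨((c : Int), PySem.Str.strip cl), ?_, rfl⟩
      rw [hcps, List.mem_filterMap]
      refine ⟨((c : Int), ms[c]), ?_, ?_⟩
      · rw [PySem.List.mem_enumerate_iff]
        exact ⟨c, hclen, by simp⟩
      · show (if PySem.Str.startswith (PySem.Str.strip ms[c]) "#" = true
            then some ((c : Int), PySem.Str.strip ms[c]) else none) = some ((c : Int), PySem.Str.strip cl)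
        rw [hcleq, if_pos hcom]
    · rw [if_neg hcom, hidx]
      show pvLoopA ms cl nsc cps =
        (match cps.foldl (fun best pc => if pc.1 < (c : Int) then some pc.2 else best) none with
         | none => ""
         | some best => PySem.Str.strip (PySem.Str.replace (PySem.Str.replace best nsc "") "'" ""))
      apply pv_loopA_notmem ms cl nsc c hidx cps hpw
      intro hmem
      rw [List.mem_map] at hmem
      obtain ⟨pc, hpc, hfst⟩ := hmem
      obtain ⟨k, hk, hpceq, hstart⟩ := pv_mem_cps ms pc (hcps ▸ hpc)
      rw [hpceq] at hfst
      simp only [] at hfst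
      have hkc : k = c := by exact_mod_cast hfst
      subst hkc
      rw [hcleq] at hstart
      exact hcom hstart
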